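-- pv_equiv track=rewrite | github.com/AJTheDataGuy/cocktails_data_engineering | scripts/spiders/superseded/web_spider.py | clean_webpage_links
-- ===== SOURCE A (Python) =====
-- from itertools import product
--
-- def clean_webpage_links(links_list: list, filter_word_list: list) -> set:
--     """Cleans the list of links from a single webpage
--     to help keep the web spider out of trouble
--
--     May be a good idea to update when moving to other websites.
--
--     Check 1: Removes links to the following pages:
--
--     1. Careers (keeps the spider from looking like it is applying for jobs)
--     2. Contact Us pages (keeps the spider from accidently contacting anyone)
--     3. Login pages (keeps the spider from being detected - login pages will
--     require a post and not a get)
--     4. Any other https listed pages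
--     5. Bill payment pages
--     6. Values of None
--     7. Any PDFs (tells the webspider not to download the PDFs)
--
--     Check 2: Also cleans links that are None or the root site (represented by a slash /)
--
--     Check 3: Removes redundant links in case a single webpage has multiple
--     links to the same website
--
--     Returns a cleaned set of unique links
--     """
--     clean_links = []
--     for link_tuples in product(links_list, filter_word_list):
--         if (link_tuples[1] not in link_tuples[0]) and (
--             link_tuples[0] not in (None, "/")
--         ):
--             clean_links.append(link_tuples[0])
--     return set(clean_links)
-- ===== SOURCE B (Python) =====
-- def clean_webpage_links(links_list: list, filter_word_list: list) -> set:
--     """Staged narrowing: build the set of links that contain EVERY filter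
--     word (one filtering pass per word), then keep the links outside it.
--     By De Morgan this keeps exactly the links missing at least one word."""
--     saturated = {link for link in links_list if link is not None}
--     for fw in filter_word_list:
--         saturated = {link for link in saturated if fw in link}
--     return {
--         link
--         for link in links_list
--         if link is not None and link != "/" and link not in saturated
--     }
-- ===== Notes on version B (the rewrite author's own statement) =====
-- stated objective: alternative
-- what changed: Inverts the loop structure: instead of A's itertools.product double loop appending a link once per non-containing word and deduping with set(), B runs one filtering pass per filter word to narrow the set of links containing every word, then keeps the links outside that saturated set (De Morgan).
-- crash fix: A raises TypeError ('in' on None) whenever links_list contains None and filter_word_list is non-empty; B pre-filters the None links and returns the cleaned set. — e.g. on clean_webpage_links([none, some "a"], ["b"]): A raises TypeError, B returns ["a"]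
import Mathlib
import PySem

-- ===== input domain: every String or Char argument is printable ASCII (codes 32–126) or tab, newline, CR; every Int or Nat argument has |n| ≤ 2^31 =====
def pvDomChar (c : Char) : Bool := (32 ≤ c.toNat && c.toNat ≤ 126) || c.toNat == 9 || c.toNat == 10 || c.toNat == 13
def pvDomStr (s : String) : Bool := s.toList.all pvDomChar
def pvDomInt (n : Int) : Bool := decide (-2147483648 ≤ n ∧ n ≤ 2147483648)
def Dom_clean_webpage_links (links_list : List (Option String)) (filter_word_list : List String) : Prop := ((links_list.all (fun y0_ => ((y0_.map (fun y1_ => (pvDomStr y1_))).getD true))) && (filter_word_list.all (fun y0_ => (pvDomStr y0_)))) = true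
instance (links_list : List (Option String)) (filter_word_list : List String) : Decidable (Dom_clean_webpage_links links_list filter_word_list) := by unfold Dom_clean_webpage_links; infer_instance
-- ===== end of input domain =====

-- B inverts the loop structure: one filtering pass per filter word narrows the set of links
-- containing every word, and links outside that set are kept (objective: alternative);
-- B also returns (pre-filtering None links) where A raises TypeError.

-- ===== PORT A =====
-- product(links_list, filter_word_list) iterated in one loop, appending, then set().
def clean_webpage_links (links_list : List (Option String)) (filter_word_list : List String) : List String :=
  let pairs := links_list.flatMap (fun link => filter_word_list.map (fun w => (link, w)))
  let clean_links := pairs.foldl (fun acc lt =>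
      match lt.1 with
      | some s => if !(PySem.Str.isIn lt.2 s) && !(s == "/") then acc ++ [s] else acc
      | none => acc   -- Python raises TypeError on ('w' not in None); such inputs are excluded by Pre_
      ) []
  PySem.Set.ofList clean_links

-- ===== PORT B =====
def clean_webpage_links_alt (links_list : List (Option String)) (filter_word_list : List String) : List String :=
  let sat0 : PySem.Set String := PySem.Set.ofList (links_list.filterMap id)
  let saturated := filter_word_list.foldl (fun s fw => s.filter (fun l => PySem.Str.isIn fw l)) sat0
  PySem.Set.ofList (links_list.filterMap (fun link =>
    match link with
    | some s => if !(s == "/") && !(PySem.Set.contains saturated s) then some s else none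
    | none => none))

-- ===== PRECONDITION & SPEC =====
-- Pre_ excludes exactly the inputs on which the Python A raises TypeError:
-- a None link together with a non-empty filter word list.
def Pre_clean_webpage_links (links_list : List (Option String)) (filter_word_list : List String) : Prop :=
  none ∉ links_list ∨ filter_word_list = []
instance (links_list : List (Option String)) (filter_word_list : List String) : Decidable (Pre_clean_webpage_links links_list filter_word_list) := by unfold Pre_clean_webpage_links; infer_instance

def pvWitness_clean_webpage_links : List (Option String) × List String :=
  ([some "a", some "/", some "ab"], ["a", "b"])

-- A raises TypeError ('in' on None) whenever links_list contains None and filter_word_list is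
-- non-empty; B pre-filters the None links and returns the cleaned set.
def Raises_clean_webpage_links (links_list : List (Option String)) (filter_word_list : List String) : Prop :=
  none ∈ links_list ∧ filter_word_list ≠ []
instance (links_list : List (Option String)) (filter_word_list : List String) : Decidable (Raises_clean_webpage_links links_list filter_word_list) := by unfold Raises_clean_webpage_links; infer_instance

def pvRaiseWitness_clean_webpage_links : List (Option String) × List String := ([none, some "a"], ["b"])
def pvRaiseWitnessOut_clean_webpage_links : List String := ["a"]

def Spec_clean_webpage_links (links_list : List (Option String)) (filter_word_list : List String) (out : List String) : Prop := out = clean_webpage_links_alt links_list filter_word_list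
instance (links_list : List (Option String)) (filter_word_list : List String) (out : List String) : Decidable (Spec_clean_webpage_links links_list filter_word_list out) := by unfold Spec_clean_webpage_links; infer_instance

-- ===== CLAIM (what is proved, stated in full; the proofs are below) =====
def Claim_equal_clean_webpage_links : Prop := ∀ (links_list : List (Option String)) (filter_word_list : List String), Dom_clean_webpage_links links_list filter_word_list → Pre_clean_webpage_links links_list filter_word_list → Spec_clean_webpage_links links_list filter_word_list (clean_webpage_links links_list filter_word_list)

def Claim_raises_clean_webpage_links : Prop := (∀ (links_list : List (Option String)) (filter_word_list : List String), Dom_clean_webpage_links links_list filter_word_list → Raises_clean_webpage_links links_list filter_word_list → ¬ Pre_clean_webpage_links links_list filter_word_list) ∧ (Dom_clean_webpage_links (pvRaiseWitness_clean_webpage_links.1) (pvRaiseWitness_clean_webpage_links.2) ∧ Raises_clean_webpage_links (pvRaiseWitness_clean_webpage_links.1) (pvRaiseWitness_clean_webpage_links.2) ∧ clean_webpage_links_alt (pvRaiseWitness_clean_webpage_links.1) (pvRaiseWitness_clean_webpage_links.2) = pvRaiseWitnessOut_clean_webpage_links)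

-- ===== LEMMAS AND PROOFS =====

-- A's per-link block in the appended list: one copy of s per non-containing filter word.
def pvBlockOf (words : List String) (link : Option String) : List String :=
  match link with
  | some s => (words.filter (fun w => !(PySem.Str.isIn w s) && !(s == "/"))).map (fun _ => s)
  | none => []

lemma pv_foldl_id (l : List String) (acc : List String) :
    l.foldl (fun a (_ : String) => a) acc = acc := by
  induction l generalizing acc with
  | nil => rfl
  | cons w t ih => simp only [List.foldl_cons]; exact ih acc

-- Shape of A's appended list.
lemma pv_alist_shape (words : List String) (links : List (Option String)) (acc : List String) :
    (links.flatMap (fun link => words.map (fun w => (link, w)))).foldl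
      (fun acc lt =>
        match lt.1 with
        | some s => if !(PySem.Str.isIn lt.2 s) && !(s == "/") then acc ++ [s] else acc
        | none => acc) acc
    = acc ++ links.flatMap (pvBlockOf words) := by
  induction links generalizing acc with
  | nil => simp
  | cons l t ih =>
    simp only [List.flatMap_cons, List.foldl_append, List.foldl_map]
    rw [ih]
    cases l with
    | none =>
      rw [pv_foldl_id]
      simp [pvBlockOf]
    | some s =>
      rw [PySem.List.foldl_append_if (fun w => !(PySem.Str.isIn w s) && !(s == "/")) (fun _ => s)]
      simp only [pvBlockOf, List.append_assoc]

lemma pv_mem_add_self (s : PySem.Set String) (x : String) : x ∈ PySem.Set.add s x := by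
  simp only [PySem.Set.add]
  split <;> simp_all

lemma pv_add_of_mem (s : PySem.Set String) (x : String) (h : x ∈ s) :
    PySem.Set.add s x = s := by
  simp [PySem.Set.add, h]

lemma pv_add_idem (s : PySem.Set String) (x : String) :
    PySem.Set.add (PySem.Set.add s x) x = PySem.Set.add s x :=
  pv_add_of_mem _ _ (pv_mem_add_self s x)

lemma pv_foldl_add_constmap (l : List String) (s : String) (acc : PySem.Set String) :
    (l.map (fun _ => s)).foldl PySem.Set.add acc
      = if l.isEmpty then acc else PySem.Set.add acc s := by
  induction l generalizing acc with
  | nil => rfl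
  | cons w t ih =>
    simp only [List.map_cons, List.foldl_cons, ih, List.isEmpty_cons]
    cases t with
    | nil => simp
    | cons a b =>
      simp only [List.isEmpty_cons]
      rw [if_neg (by simp), if_neg (by simp), pv_add_idem]

-- Membership in B's progressively narrowed set: survives every filtering pass
-- iff it was in the initial set and contains every filter word.
lemma pv_mem_foldl_filter (words : List String) (init : List String) (x : String) :
    x ∈ words.foldl (fun s fw => s.filter (fun l => PySem.Str.isIn fw l)) init
      ↔ x ∈ init ∧ ∀ fw ∈ words, PySem.Str.isIn fw x = true := by
  induction words generalizing init with
  | nil => simp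
  | cons w t ih =>
    simp only [List.foldl_cons, ih, List.mem_filter, List.mem_cons]
    constructor
    · rintro ⟨⟨hi, hw⟩, hall⟩
      exact ⟨hi, fun fw hfw => by rcases hfw with rfl | hfw; exacts [hw, hall fw hfw]⟩
    · rintro ⟨hi, hall⟩
      exact ⟨⟨hi, hall w (Or.inl rfl)⟩, fun fw hfw => hall fw (Or.inr hfw)⟩

-- For a link actually occurring in links_list, B's "outside the saturated set" test
-- coincides with the existential "misses some filter word" test.
lemma pv_cond_eq (words : List String) (links : List (Option String)) (s : String)
    (hmem : some s ∈ links) :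
    (!(s == "/") && !(PySem.Set.contains
        (words.foldl (fun t fw => t.filter (fun l => PySem.Str.isIn fw l))
          (PySem.Set.ofList (links.filterMap id))) s))
    = (!(s == "/") && words.any (fun fw => !(PySem.Str.isIn fw s))) := by
  have hs0 : s ∈ PySem.Set.ofList (links.filterMap id) := by
    rw [PySem.Set.mem_ofList]
    exact List.mem_filterMap.mpr ⟨some s, hmem, rfl⟩
  congr 1
  by_cases hall : ∀ fw ∈ words, PySem.Str.isIn fw s = true
  · have hc : PySem.Set.contains
        (words.foldl (fun t fw => t.filter (fun l => PySem.Str.isIn fw l))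
          (PySem.Set.ofList (links.filterMap id))) s = true := by
      rw [PySem.Set.contains_iff, pv_mem_foldl_filter]
      exact ⟨hs0, hall⟩
    have ha : words.any (fun fw => !(PySem.Str.isIn fw s)) = false := by
      refine List.any_eq_false.mpr (fun fw hfw => ?_)
      rw [hall fw hfw]
      decide
    rw [hc, ha]; rfl
  · have hc : PySem.Set.contains
        (words.foldl (fun t fw => t.filter (fun l => PySem.Str.isIn fw l))
          (PySem.Set.ofList (links.filterMap id))) s = false := by
      rw [Bool.eq_false_iff]
      intro h
      exact hall (pv_mem_foldl_filter words _ s |>.mp ((PySem.Set.contains_iff _ s).mp h)).2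
    have ha : words.any (fun fw => !(PySem.Str.isIn fw s)) = true := by
      rcases not_forall.mp hall with ⟨fw, hfw⟩
      rcases Classical.not_imp.mp hfw with ⟨hmemw, hne⟩
      exact List.any_eq_true.mpr ⟨fw, hmemw, by rw [Bool.eq_false_iff.mpr hne]; rfl⟩
    rw [hc, ha]; rfl

-- The set built from A's per-link blocks equals the set built from the existential filterMap.
lemma pv_set_level (words : List String) (links : List (Option String)) (acc : PySem.Set String) :
    (links.flatMap (pvBlockOf words)).foldl PySem.Set.add acc
    = (links.filterMap (fun link =>
        match link with
        | some s =>
            if !(s == "/") && words.any (fun fw => !(PySem.Str.isIn fw s)) then some s else none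
        | none => none)).foldl PySem.Set.add acc := by
  induction links generalizing acc with
  | nil => rfl
  | cons l t ih =>
    cases l with
    | none => simpa [pvBlockOf] using ih acc
    | some s =>
      simp only [List.flatMap_cons, List.filterMap_cons, List.foldl_append, pvBlockOf]
      rw [pv_foldl_add_constmap]
      by_cases hs : s = "/"
      · have hempty : (words.filter (fun w => !(PySem.Str.isIn w s) && !(s == "/"))) = [] := by
          subst hs; simp
        have hc : (!(s == "/") && words.any (fun fw => !(PySem.Str.isIn fw s))) = false := by
          subst hs; simp
        rw [hempty, hc]
        simpa using ih acc
      · by_cases ha : (words.any fun fw => !(PySem.Str.isIn fw s)) = true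
        · have hne : (words.filter (fun w => !(PySem.Str.isIn w s) && !(s == "/"))).isEmpty = false := by
            rcases List.any_eq_true.mp ha with ⟨w, hw, hIn⟩
            have hwf : w ∈ words.filter (fun w => !(PySem.Str.isIn w s) && !(s == "/")) := by
              refine List.mem_filter.mpr ⟨hw, ?_⟩
              simp only [Bool.and_eq_true]
              exact ⟨hIn, by simp [hs]⟩
            rcases hfe : words.filter (fun w => !(PySem.Str.isIn w s) && !(s == "/")) with _ | _
            · rw [hfe] at hwf; simp at hwf
            · rfl
          have hc : (!(s == "/") && words.any (fun fw => !(PySem.Str.isIn fw s))) = true := by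
            simp only [Bool.and_eq_true]
            exact ⟨by simp [hs], ha⟩
          rw [hne, hc]
          simpa using ih (PySem.Set.add acc s)
        · have ha0 : (words.any fun fw => !(PySem.Str.isIn fw s)) = false :=
            Bool.eq_false_iff.mpr ha
          have hempty : (words.filter (fun w => !(PySem.Str.isIn w s) && !(s == "/"))) = [] := by
            refine List.filter_eq_nil_iff.mpr ?_
            intro w hw
            have := List.any_eq_false.mp ha0 w hw
            simp_all
          have hc : (!(s == "/") && words.any (fun fw => !(PySem.Str.isIn fw s))) = false := by
            rw [ha0]; simp
          rw [hempty, hc]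
          simpa using ih acc

-- B's filterMap list IS the existential filterMap list (pointwise, using pv_cond_eq).
lemma pv_blist_eq (words : List String) (links : List (Option String)) :
    (links.filterMap (fun link =>
      match link with
      | some s => if !(s == "/") && !(PySem.Set.contains
            (words.foldl (fun t fw => t.filter (fun l => PySem.Str.isIn fw l))
              (PySem.Set.ofList (links.filterMap id))) s) then some s else none
      | none => none))
    = (links.filterMap (fun link =>
        match link with
        | some s =>
            if !(s == "/") && words.any (fun fw => !(PySem.Str.isIn fw s)) then some s else none
        | none => none)) := by
  apply List.filterMap_congr
  intro link hlink
  cases link with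
  | none => rfl
  | some s => simp only [pv_cond_eq words links s hlink]

-- ===== VERDICT (by name: the statement is the Claim_ definition above) =====
theorem clean_webpage_links_spec : Claim_equal_clean_webpage_links := by
  intro links words _ _
  show _ = _
  unfold clean_webpage_links clean_webpage_links_alt
  simp only
  rw [pv_blist_eq words links]
  simp only [PySem.Set.ofList_eq_foldl]
  rw [pv_alist_shape, List.nil_append, pv_set_level]

theorem clean_webpage_links_raises : Claim_raises_clean_webpage_links := by
  unfold Claim_raises_clean_webpage_links
  constructor
  · intro links words _ hr hp
    rcases hr with ⟨hmem, hne⟩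
    rcases hp with h | h
    · exact h hmem
    · exact hne h
  · decide

-- self-check: at the raise witness, B's port indeed returns the stated literal (projection of the claim above)
theorem pv_raise_witness_ok :
    clean_webpage_links_alt (pvRaiseWitness_clean_webpage_links.1) (pvRaiseWitness_clean_webpage_links.2)
      = pvRaiseWitnessOut_clean_webpage_links :=
  clean_webpage_links_raises.2.2.2
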